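-- pv_equiv track=rewrite | github.com/Charanmallina/Test_Case_Generator | web_app/app.py | filter_transcripts
-- ===== SOURCE A (Python) =====
-- def filter_transcripts(transcripts, filters):
--     """Filter transcripts based on user criteria"""
--     filtered = transcripts
--
--     if filters.get('channel') and filters['channel'] != 'all':
--         filtered = [t for t in filtered if t.get('channel') == filters['channel']]
--
--     if filters.get('category') and filters['category'] != 'all':
--         filtered = [t for t in filtered if t.get('category') == filters['category']]
--
--     if filters.get('severity') and filters['severity'] != 'all':
--         filtered = [t for t in filtered if t.get('severity') == filters['severity']]
--
--     return filtered
-- ===== SOURCE B (Python) =====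
-- def filter_transcripts(transcripts, filters):
--     """Filter transcripts based on user criteria"""
--     active = [(k, filters[k]) for k in ('channel', 'category', 'severity')
--               if filters.get(k) and filters[k] != 'all']
--     return [t for t in transcripts
--             if all(t.get(k) == v for k, v in active)]
-- ===== Notes on version B (the rewrite author's own statement) =====
-- stated objective: simpler
-- what changed: Instead of three sequential list rebuilds (one per criterion), B first collects the active (key, value) criteria and then makes a single pass over the transcripts keeping those matching all of them.
import Mathlib
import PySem

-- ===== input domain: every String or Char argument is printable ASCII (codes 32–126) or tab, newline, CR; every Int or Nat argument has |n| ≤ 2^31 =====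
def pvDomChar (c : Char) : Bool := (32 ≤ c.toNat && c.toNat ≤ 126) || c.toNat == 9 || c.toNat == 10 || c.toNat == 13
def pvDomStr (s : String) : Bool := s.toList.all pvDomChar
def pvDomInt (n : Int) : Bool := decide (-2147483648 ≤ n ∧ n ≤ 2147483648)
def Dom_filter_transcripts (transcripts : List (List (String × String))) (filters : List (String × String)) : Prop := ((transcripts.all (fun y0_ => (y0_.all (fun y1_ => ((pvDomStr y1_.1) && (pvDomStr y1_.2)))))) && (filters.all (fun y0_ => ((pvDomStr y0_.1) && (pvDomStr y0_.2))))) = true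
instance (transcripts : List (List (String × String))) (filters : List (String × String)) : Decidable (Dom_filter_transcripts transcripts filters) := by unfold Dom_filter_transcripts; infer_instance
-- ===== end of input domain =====

-- B replaces A's three sequential filter passes by collecting the active criteria once
-- and filtering the transcripts in a single pass (objective: simpler).


-- ===== PORT A =====
-- dict.get(k) on an association list = first match (shared helper of both ports)
def pvLookup (d : List (String × String)) (k : String) : Option String :=
  match d with
  | [] => none
  | (k', v) :: rest => if k' == k then some v else pvLookup rest k

-- one 'if filters.get(key) and filters[key] != "all": filtered = [t for t in filtered if t.get(key) == filters[key]]' step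
def pvStepA (filters : List (String × String)) (key : String)
    (filtered : List (List (String × String))) : List (List (String × String)) :=
  match pvLookup filters key with
  | some v =>
      if v ≠ "" ∧ v ≠ "all" then
        filtered.filter (fun t => pvLookup t key == some v)
      else filtered
  | none => filtered

def filter_transcripts (transcripts : List (List (String × String))) (filters : List (String × String)) : List (List (String × String)) :=
  let filtered := transcripts
  let filtered := pvStepA filters "channel" filtered
  let filtered := pvStepA filters "category" filtered
  let filtered := pvStepA filters "severity" filtered
  filtered

-- ===== PORT B =====
-- active = [(k, filters[k]) for k in ('channel','category','severity') if filters.get(k) and filters[k] != 'all']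
def pvActive (filters : List (String × String)) : List (String × String) :=
  ["channel", "category", "severity"].filterMap (fun k =>
    match pvLookup filters k with
    | some v => if v ≠ "" ∧ v ≠ "all" then some (k, v) else none
    | none => none)

def filter_transcripts_alt (transcripts : List (List (String × String))) (filters : List (String × String)) : List (List (String × String)) :=
  let active := pvActive filters
  transcripts.filter (fun t => active.all (fun kv => pvLookup t kv.1 == some kv.2))

-- ===== PRECONDITION & SPEC =====
def Spec_filter_transcripts (transcripts : List (List (String × String))) (filters : List (String × String)) (out : List (List (String × String))) : Prop := out = filter_transcripts_alt transcripts filters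
instance (transcripts : List (List (String × String))) (filters : List (String × String)) (out : List (List (String × String))) : Decidable (Spec_filter_transcripts transcripts filters out) := by unfold Spec_filter_transcripts; infer_instance

-- ===== CLAIM (what is proved, stated in full; the proofs are below) =====
def Claim_equal_filter_transcripts : Prop := ∀ (transcripts : List (List (String × String))) (filters : List (String × String)), Dom_filter_transcripts transcripts filters → Spec_filter_transcripts transcripts filters (filter_transcripts transcripts filters)

-- ===== LEMMAS AND PROOFS =====

theorem filter_transcripts_eq_alt (transcripts : List (List (String × String))) (filters : List (String × String)) :
    filter_transcripts transcripts filters = filter_transcripts_alt transcripts filters := by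
  unfold filter_transcripts filter_transcripts_alt pvActive pvStepA
  cases h1 : pvLookup filters "channel" <;>
  cases h2 : pvLookup filters "category" <;>
  cases h3 : pvLookup filters "severity" <;>
    simp only [List.filterMap, h1, h2, h3] <;>
    (try split_ifs) <;>
    simp [List.filter_filter, Bool.and_assoc, Bool.and_comm]

-- ===== VERDICT (by name: the statement is the Claim_ definition above) =====
theorem filter_transcripts_spec : Claim_equal_filter_transcripts := by
  intro ts fs _
  unfold Spec_filter_transcripts
  exact filter_transcripts_eq_alt ts fs
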